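-- pv_equiv track=rewrite | github.com/fabianpradod/proyecto2-cyk | cnf.py | _eliminate_useless_symbols
-- ===== SOURCE A (Python) =====
-- from collections import defaultdict, deque
-- from typing import DefaultDict, Dict, Iterable, List, Set, Tuple
--
-- Symbol = str
--
-- ProductionRHS = Tuple[Symbol, ...]
--
-- def _eliminate_useless_symbols(
--     productions: Dict[Symbol, Set[ProductionRHS]],
--     start_symbol: Symbol,
-- ) -> Dict[Symbol, Set[ProductionRHS]]:
--     """
--     Remove productions that involve non-generating or unreachable symbols.
--     """
--
--     # find generating symbols (those that can derive a string of terminals)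
--     nonterminals = set(productions)
--     generating: Set[Symbol] = set()
--     changed = True
--
--     while changed:
--         changed = False
--         for lhs, rhs_set in productions.items():
--             if lhs in generating:
--                 continue
--             for rhs in rhs_set:
--                 if all(
--                     symbol not in nonterminals or symbol in generating
--                     for symbol in rhs
--                 ):
--                     generating.add(lhs)
--                     changed = True
--                     break
--
--     # Remove any production whose left-hand side is non-generating
--     filtered: Dict[Symbol, Set[ProductionRHS]] = {}
--     for lhs, rhs_set in productions.items():
--         if lhs not in generating:
--             continue
--         valid_rhs: Set[ProductionRHS] = set()
--         for rhs in rhs_set: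
--             if all(
--                 symbol not in nonterminals or symbol in generating
--                 for symbol in rhs
--             ):
--                 valid_rhs.add(rhs)
--         if valid_rhs:
--             filtered[lhs] = valid_rhs
--
--     # remove unreachable symbols using a BFS from the start symbol
--     reachable: Set[Symbol] = set()
--     queue: deque[Symbol] = deque([start_symbol])
--
--     while queue:
--         current = queue.popleft()
--         if current not in filtered or current in reachable:
--             continue
--         reachable.add(current)
--
--         for rhs in filtered[current]:
--             for symbol in rhs:
--                 if symbol in filtered and symbol not in reachable:
--                     queue.append(symbol)
--
--     final_prods: Dict[Symbol, Set[ProductionRHS]] = {}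
--     for lhs, rhs_set in filtered.items():
--         if lhs not in reachable:
--             continue
--         kept_rhs: Set[ProductionRHS] = set()
--         for rhs in rhs_set:
--             if all(
--                 symbol not in filtered or symbol in reachable
--                 for symbol in rhs
--             ):
--                 kept_rhs.add(rhs)
--         if kept_rhs:
--             final_prods[lhs] = kept_rhs
--
--     return final_prods
-- ===== SOURCE B (Python) =====
-- from collections import deque
--
--
-- def _eliminate_useless_symbols(productions, start_symbol):
--     """
--     Remove productions that involve non-generating or unreachable symbols.
--
--     Generating symbols are found with a worklist over an occurrence index
--     (symbol -> productions mentioning it) instead of repeated full passes.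
--     """
--     nonterminals = set(productions)
--
--     # flatten productions and build the occurrence index; seed the worklist
--     # with left-hand sides of productions whose RHS mentions no nonterminal
--     flat = [(lhs, rhs) for lhs, rhs_set in productions.items() for rhs in rhs_set]
--     occ = {}
--     generating = set()
--     queue = deque()
--     for lhs, rhs in flat:
--         nts_in = [s for s in rhs if s in nonterminals]
--         for s in dict.fromkeys(nts_in):
--             occ.setdefault(s, []).append((lhs, rhs))
--         if not nts_in and lhs not in generating:
--             generating.add(lhs)
--             queue.append(lhs)
--
--     # propagate: when a symbol becomes generating, only re-examine the
--     # productions whose right-hand side mentions it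
--     while queue:
--         sym = queue.popleft()
--         for lhs, rhs in occ.get(sym, ()):
--             if lhs not in generating and all(
--                 s not in nonterminals or s in generating for s in rhs
--             ):
--                 generating.add(lhs)
--                 queue.append(lhs)
--
--     # drop non-generating symbols and productions
--     filtered = {}
--     for lhs, rhs_set in productions.items():
--         valid = {
--             rhs
--             for rhs in rhs_set
--             if all(s not in nonterminals or s in generating for s in rhs)
--         }
--         if lhs in generating and valid:
--             filtered[lhs] = valid
--
--     # remove unreachable symbols using a BFS from the start symbol
--     reachable = set()
--     queue = deque([start_symbol])
--     while queue:
--         current = queue.popleft()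
--         if current not in filtered or current in reachable:
--             continue
--         reachable.add(current)
--         for rhs in filtered[current]:
--             for symbol in rhs:
--                 if symbol in filtered and symbol not in reachable:
--                     queue.append(symbol)
--
--     final_prods = {}
--     for lhs, rhs_set in filtered.items():
--         kept = {
--             rhs
--             for rhs in rhs_set
--             if all(s not in filtered or s in reachable for s in rhs)
--         }
--         if lhs in reachable and kept:
--             final_prods[lhs] = kept
--     return final_prods
-- ===== Notes on version B (the rewrite author's own statement) =====
-- stated objective: alternative
-- what changed: The generating-symbols fixpoint is computed with a worklist seeded by productions whose RHS has no nonterminal, propagating through an occurrence index (symbol -> productions mentioning it), instead of A's repeated full passes over all productions until nothing changes; the reachability BFS is kept.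
import Mathlib
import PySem

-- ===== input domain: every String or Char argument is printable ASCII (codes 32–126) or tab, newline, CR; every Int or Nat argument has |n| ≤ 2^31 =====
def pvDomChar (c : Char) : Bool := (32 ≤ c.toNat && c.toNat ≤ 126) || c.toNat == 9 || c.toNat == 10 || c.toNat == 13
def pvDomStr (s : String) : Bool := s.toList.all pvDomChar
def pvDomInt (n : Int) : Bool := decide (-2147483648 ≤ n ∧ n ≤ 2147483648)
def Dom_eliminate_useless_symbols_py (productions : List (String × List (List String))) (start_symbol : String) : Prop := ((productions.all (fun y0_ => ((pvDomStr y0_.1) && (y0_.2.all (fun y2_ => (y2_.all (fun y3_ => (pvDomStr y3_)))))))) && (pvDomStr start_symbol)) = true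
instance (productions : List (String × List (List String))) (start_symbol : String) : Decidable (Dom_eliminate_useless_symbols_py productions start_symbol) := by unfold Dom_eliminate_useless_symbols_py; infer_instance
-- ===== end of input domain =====

-- B replaces A's repeated full passes for the generating-symbol fixpoint by a worklist over an
-- occurrence index (symbol → productions mentioning it), keeping the reachability BFS; objective: alternative.

-- ===== PORT A =====

-- 'all(symbol not in nonterminals or symbol in generating for symbol in rhs)' — the same Python
-- expression appears verbatim in A and B, so both ports share this helper.
def pvAllGen (nts gen : PySem.Set String) (rhs : List String) : Bool :=
  rhs.all (fun s => !(PySem.Set.contains nts s) || PySem.Set.contains gen s)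

-- body of A's 'for lhs, rhs_set in productions.items()' pass (with the changed flag)
def pvStepA (nts : PySem.Set String) (acc : PySem.Set String × Bool)
    (p : String × List (List String)) : PySem.Set String × Bool :=
  if PySem.Set.contains acc.1 p.1 then acc
  else if p.2.any (fun rhs => pvAllGen nts acc.1 rhs) then (PySem.Set.add acc.1 p.1, true)
  else acc

-- one 'while changed' iteration: changed = False; one pass over the productions
def pvPassA (prods : List (String × List (List String))) (nts : PySem.Set String)
    (gen : PySem.Set String) : PySem.Set String × Bool :=
  prods.foldl (pvStepA nts) (gen, false)

-- 'while changed': each changing pass adds at least one of the ≤ |prods| left-hand sides,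
-- so |prods| + 1 rounds of fuel are enough (proved below, pvGenLoopA_closed)
def pvGenLoopA (prods : List (String × List (List String))) (nts : PySem.Set String) :
    Nat → PySem.Set String → PySem.Set String
  | 0, gen => gen
  | fuel + 1, gen =>
    let r := pvPassA prods nts gen
    if r.2 then pvGenLoopA prods nts fuel r.1 else r.1

-- A's second phase: keep generating lhs, keep rhs whose nonterminal symbols all generate
def pvFilteredA (prods : List (String × List (List String))) (nts gen : PySem.Set String) :
    PySem.Dict String (List (List String)) :=
  prods.foldl
    (fun d p =>
      if PySem.Set.contains gen p.1 then
        let valid := p.2.foldl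
          (fun (v : PySem.Set (List String)) rhs =>
            if pvAllGen nts gen rhs then PySem.Set.add v rhs else v)
          PySem.Set.empty
        if valid = [] then d else d.insert p.1 valid
      else d)
    PySem.Dict.empty

-- the reachability BFS — this loop is verbatim identical in A and in B, so the ports share it
def pvBFS (filtered : PySem.Dict String (List (List String))) :
    Nat → List String → PySem.Set String → PySem.Set String
  | 0, _, reach => reach
  | _ + 1, [], reach => reach
  | fuel + 1, current :: rest, reach =>
    if !(filtered.contains current) || PySem.Set.contains reach current then
      pvBFS filtered fuel rest reach
    else
      let reach' := PySem.Set.add reach current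
      let queue' := (filtered.getD current []).foldl
        (fun q rhs =>
          q ++ rhs.filter (fun s => filtered.contains s && !(PySem.Set.contains reach' s)))
        rest
      pvBFS filtered fuel queue' reach'

-- total queue insertions ≤ 1 (start) + one per symbol occurrence in filtered, so this fuel
-- lets the BFS run until its queue is empty, exactly like Python's 'while queue'
def pvBFSFuel (filtered : PySem.Dict String (List (List String))) : Nat :=
  2 + (filtered.items.map (fun p => (p.2.map List.length).sum)).sum

-- A's last phase
def pvFinalA (filtered : PySem.Dict String (List (List String))) (reach : PySem.Set String) :
    PySem.Dict String (List (List String)) :=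
  filtered.items.foldl
    (fun d p =>
      if PySem.Set.contains reach p.1 then
        let kept := p.2.foldl
          (fun (v : PySem.Set (List String)) rhs =>
            if rhs.all (fun s => !(filtered.contains s) || PySem.Set.contains reach s) then
              PySem.Set.add v rhs
            else v)
          PySem.Set.empty
        if kept = [] then d else d.insert p.1 kept
      else d)
    PySem.Dict.empty

def eliminate_useless_symbols_py (productions : List (String × List (List String)))
    (start_symbol : String) : List (String × List (List String)) :=
  let nts := PySem.Set.ofList (productions.map Prod.fst)
  let generating := pvGenLoopA productions nts (productions.length + 1) PySem.Set.empty
  let filtered := pvFilteredA productions nts generating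
  let reachable := pvBFS filtered (pvBFSFuel filtered) [start_symbol] PySem.Set.empty
  (pvFinalA filtered reachable).items

-- ===== PORT B =====

-- flat = [(lhs, rhs) for lhs, rhs_set in productions.items() for rhs in rhs_set]
def pvFlat (prods : List (String × List (List String))) : List (String × List String) :=
  prods.flatMap (fun p => p.2.map (fun rhs => (p.1, rhs)))

-- body of B's index-building loop: occ, generating, queue
def pvStepInitB (nts : PySem.Set String)
    (acc : PySem.Dict String (List (String × List String)) × PySem.Set String × List String)
    (p : String × List String) :
    PySem.Dict String (List (String × List String)) × PySem.Set String × List String :=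
  let nts_in := p.2.filter (fun s => PySem.Set.contains nts s)
  let occ := (PySem.List.dedup nts_in).foldl (fun d s => d.modify s [] (fun l => l ++ [p])) acc.1
  if nts_in.isEmpty && !(PySem.Set.contains acc.2.1 p.1) then
    (occ, PySem.Set.add acc.2.1 p.1, acc.2.2 ++ [p.1])
  else (occ, acc.2.1, acc.2.2)

def pvInitB (nts : PySem.Set String) (flat : List (String × List String)) :
    PySem.Dict String (List (String × List String)) × PySem.Set String × List String :=
  flat.foldl (pvStepInitB nts) (PySem.Dict.empty, PySem.Set.empty, [])

-- body of B's 'for lhs, rhs in occ.get(sym, ())' rescan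
def pvStepWB (nts : PySem.Set String) (acc : PySem.Set String × List String)
    (p : String × List String) : PySem.Set String × List String :=
  if !(PySem.Set.contains acc.1 p.1) && pvAllGen nts acc.1 p.2 then
    (PySem.Set.add acc.1 p.1, acc.2 ++ [p.1])
  else acc

-- B's 'while queue' worklist; every queue entry is a newly generating lhs, so
-- |prods| + |initial queue| + 1 fuel empties the queue (proved below)
def pvWorklistB (nts : PySem.Set String) (occ : PySem.Dict String (List (String × List String))) :
    Nat → List String → PySem.Set String → PySem.Set String
  | 0, _, gen => gen
  | _ + 1, [], gen => gen
  | fuel + 1, sym :: rest, gen =>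
    let st := (occ.getD sym []).foldl (pvStepWB nts) (gen, rest)
    pvWorklistB nts occ fuel st.2 st.1

-- B's filtering comprehension
def pvFilteredB (prods : List (String × List (List String))) (nts gen : PySem.Set String) :
    PySem.Dict String (List (List String)) :=
  prods.foldl
    (fun d p =>
      let valid := PySem.Set.ofList (p.2.filter (fun rhs => pvAllGen nts gen rhs))
      if PySem.Set.contains gen p.1 && !valid.isEmpty then d.insert p.1 valid else d)
    PySem.Dict.empty

-- B's final comprehension
def pvFinalB (filtered : PySem.Dict String (List (List String))) (reach : PySem.Set String) :
    PySem.Dict String (List (List String)) :=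
  filtered.items.foldl
    (fun d p =>
      let kept := PySem.Set.ofList (p.2.filter
        (fun rhs => rhs.all (fun s => !(filtered.contains s) || PySem.Set.contains reach s)))
      if PySem.Set.contains reach p.1 && !kept.isEmpty then d.insert p.1 kept else d)
    PySem.Dict.empty

def eliminate_useless_symbols_py_alt (productions : List (String × List (List String)))
    (start_symbol : String) : List (String × List (List String)) :=
  let nts := PySem.Set.ofList (productions.map Prod.fst)
  let flat := pvFlat productions
  let init := pvInitB nts flat
  let generating :=
    pvWorklistB nts init.1 (productions.length + init.2.2.length + 1) init.2.2 init.2.1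
  let filtered := pvFilteredB productions nts generating
  let reachable := pvBFS filtered (pvBFSFuel filtered) [start_symbol] PySem.Set.empty
  (pvFinalB filtered reachable).items

-- ===== PRECONDITION & SPEC =====
def Spec_eliminate_useless_symbols_py (productions : List (String × List (List String))) (start_symbol : String) (out : List (String × List (List String))) : Prop := out = eliminate_useless_symbols_py_alt productions start_symbol
instance (productions : List (String × List (List String))) (start_symbol : String) (out : List (String × List (List String))) : Decidable (Spec_eliminate_useless_symbols_py productions start_symbol out) := by unfold Spec_eliminate_useless_symbols_py; infer_instance

-- ===== CLAIM (what is proved, stated in full; the proofs are below) =====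
def Claim_equal_eliminate_useless_symbols_py : Prop := ∀ (productions : List (String × List (List String))) (start_symbol : String), Dom_eliminate_useless_symbols_py productions start_symbol → Spec_eliminate_useless_symbols_py productions start_symbol (eliminate_useless_symbols_py productions start_symbol)


-- ===== LEMMAS AND PROOFS =====

-- the least set of generating symbols, the common semantics both generating loops compute
inductive pvGen (prods : List (String × List (List String))) (nts : PySem.Set String) : String → Prop where
  | mk (lhs : String) (rhs_set : List (List String)) (rhs : List String) :
      (lhs, rhs_set) ∈ prods → rhs ∈ rhs_set →
      (∀ s ∈ rhs, PySem.Set.contains nts s = true → pvGen prods nts s) → pvGen prods nts lhs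

lemma pvContains_iff {s : PySem.Set String} {x : String} :
    PySem.Set.contains s x = true ↔ x ∈ s := by
  simp [PySem.Set.contains]

lemma pvContains_congr {g₁ g₂ : PySem.Set String} (h : ∀ x, x ∈ g₁ ↔ x ∈ g₂) (y : String) :
    PySem.Set.contains g₁ y = PySem.Set.contains g₂ y := by
  rw [Bool.eq_iff_iff, pvContains_iff, pvContains_iff]
  exact h y

lemma pvAllGen_iff {nts g : PySem.Set String} {rhs : List String} :
    pvAllGen nts g rhs = true ↔ ∀ s ∈ rhs, PySem.Set.contains nts s = true → s ∈ g := by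
  simp only [pvAllGen, List.all_eq_true, Bool.or_eq_true, Bool.not_eq_eq_eq_not, Bool.not_true]
  constructor
  · intro h s hs hn
    rcases h s hs with h' | h'
    · rw [hn] at h'; cases h'
    · exact pvContains_iff.mp h'
  · intro h s hs
    cases hn : PySem.Set.contains nts s
    · exact Or.inl rfl
    · exact Or.inr (pvContains_iff.mpr (h s hs hn))

lemma pvAllGen_congr (nts : PySem.Set String) {g₁ g₂ : PySem.Set String}
    (h : ∀ x, x ∈ g₁ ↔ x ∈ g₂) (rhs : List String) :
    pvAllGen nts g₁ rhs = pvAllGen nts g₂ rhs := by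
  unfold pvAllGen
  congr 1
  funext s
  rw [pvContains_congr h]

lemma pvAddIf_eq (p : List String → Bool) (l : List (List String)) (acc : PySem.Set (List String)) :
    l.foldl (fun v rhs => if p rhs then PySem.Set.add v rhs else v) acc
      = (l.filter p).foldl PySem.Set.add acc := by
  induction l generalizing acc with
  | nil => rfl
  | cons a t ih => by_cases hp : p a <;> simp [List.filter_cons, hp, ih]

lemma pvFilterLenLe {α : Type} (D : List α) (p q : α → Bool) (hpq : ∀ k, q k = true → p k = true) :
    (D.filter q).length ≤ (D.filter p).length := by
  induction D with
  | nil => exact Nat.le_refl _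
  | cons a t ih =>
    cases hq : q a
    · cases hp : p a <;> simp [List.filter_cons, hq, hp] <;> omega
    · rw [List.filter_cons, List.filter_cons, hpq a hq, hq]
      simpa using ih

lemma pvFilterLenLt {α : Type} {D : List α} {p q : α → Bool}
    (hpq : ∀ k, q k = true → p k = true) {x : α} (hx : x ∈ D) (hpx : p x = true)
    (hqx : q x = false) : (D.filter q).length < (D.filter p).length := by
  induction D with
  | nil => cases hx
  | cons a t ih =>
    rcases List.mem_cons.mp hx with rfl | hxt
    · rw [List.filter_cons, List.filter_cons, hpx, hqx]
      simpa using Nat.lt_succ_of_le (pvFilterLenLe t p q hpq)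
    · cases hq : q a
      · cases hp : p a
        · simpa [List.filter_cons, hq, hp] using ih hxt
        · simp only [List.filter_cons, hq, hp, cond_true, cond_false, List.length_cons]
          exact Nat.lt_succ_of_lt (ih hxt)
      · rw [List.filter_cons, List.filter_cons, hpq a hq, hq]
        simpa using ih hxt

-- the termination measure of both generating loops: distinct nonterminals not yet generating
def pvMeas (K g : List String) : Nat :=
  ((PySem.List.dedup K).filter (fun k => !(PySem.Set.contains g k))).length

lemma pvNotContains_iff {g : List String} {k : String} :
    (!(PySem.Set.contains g k)) = true ↔ k ∉ g := by
  simp [PySem.Set.contains]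

lemma pvMeas_lt {K g g' : List String} (hsub : ∀ x ∈ g, x ∈ g')
    {x : String} (hx : x ∈ K) (hxg : x ∉ g) (hxg' : x ∈ g') : pvMeas K g' < pvMeas K g := by
  apply pvFilterLenLt (x := x)
  · intro k hk
    exact pvNotContains_iff.mpr (fun hm => pvNotContains_iff.mp hk (hsub k hm))
  · exact (PySem.List.mem_dedup K x).mpr hx
  · exact pvNotContains_iff.mpr hxg
  · simpa [PySem.Set.contains] using hxg'

lemma pvOfListLen {α : Type} [BEq α] [LawfulBEq α] (l : List α) :
    ∀ acc : PySem.Set α, (l.foldl PySem.Set.add acc).length ≤ acc.length + l.length := by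
  induction l with
  | nil => intro acc; simp
  | cons a t ih =>
    intro acc
    rw [List.foldl_cons]
    refine Nat.le_trans (ih _) ?_
    rw [PySem.Set.add_eq_ite]
    split_ifs <;> simp <;> omega

lemma pvMeas_le (K : List String) (g : List String) : pvMeas K g ≤ K.length := by
  refine Nat.le_trans (List.length_filter_le _ _) ?_
  rw [PySem.List.dedup_eq_ofList, PySem.Set.ofList_eq_foldl]
  simpa using pvOfListLen K []

lemma pvFilterAddLen {D : List String} (hnd : D.Nodup) {g : List String} {x : String}
    (hxD : x ∈ D) (hxg : x ∉ g) :
    (D.filter (fun k => !(PySem.Set.contains (PySem.Set.add g x) k))).length + 1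
      = (D.filter (fun k => !(PySem.Set.contains g k))).length := by
  have hadd : PySem.Set.add g x = g ++ [x] := PySem.Set.add_of_not_mem hxg
  induction D with
  | nil => cases hxD
  | cons a t ih =>
    rcases List.nodup_cons.mp hnd with ⟨hna, hndt⟩
    rcases List.mem_cons.mp hxD with rfl | hxt
    · have h1 : (!(PySem.Set.contains (PySem.Set.add g x) x)) = false := by
        simp [hadd, PySem.Set.contains]
      have h2 : (!(PySem.Set.contains g x)) = true := pvNotContains_iff.mpr hxg
      rw [List.filter_cons, List.filter_cons, h1, h2]
      have heq : t.filter (fun k => !(PySem.Set.contains (PySem.Set.add g x) k))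
          = t.filter (fun k => !(PySem.Set.contains g k)) := by
        apply List.filter_congr
        intro k hk
        have hkx : k ≠ x := fun e => hna (e ▸ hk)
        simp [hadd, PySem.Set.contains, hkx]
      rw [heq]
      simp
    · have hax : a ≠ x := fun e => hna (e ▸ hxt)
      have hsame : (!(PySem.Set.contains (PySem.Set.add g x) a)) = (!(PySem.Set.contains g a)) := by
        simp [hadd, PySem.Set.contains, hax]
      rw [List.filter_cons, List.filter_cons, hsame]
      cases hb : (!(PySem.Set.contains g a)) <;> simp [hb] <;>
        simpa using ih hndt hxt

lemma pvMeas_add {K g : List String} {x : String} (hx : x ∈ K) (hxg : x ∉ g) :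
    pvMeas K (PySem.Set.add g x) + 1 = pvMeas K g :=
  pvFilterAddLen (PySem.List.nodup_dedup K) ((PySem.List.mem_dedup K x).mpr hx) hxg


-- ===== A's pass and loop =====

lemma pvPassA_flag (nts : PySem.Set String) :
    ∀ (l : List (String × List (List String))) (g : PySem.Set String),
      (l.foldl (pvStepA nts) (g, true)).2 = true := by
  intro l
  induction l with
  | nil => intro g; rfl
  | cons p t ih =>
    intro g
    simp only [List.foldl_cons, pvStepA]
    split_ifs <;> exact ih _

lemma pvPassA_mono (nts : PySem.Set String) :
    ∀ (l : List (String × List (List String))) (g : PySem.Set String) (c : Bool) (x : String),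
      x ∈ g → x ∈ (l.foldl (pvStepA nts) (g, c)).1 := by
  intro l
  induction l with
  | nil => intro g c x hx; exact hx
  | cons p t ih =>
    intro g c x hx
    simp only [List.foldl_cons, pvStepA]
    split_ifs <;> [exact ih g c x hx; exact ih _ _ x ((PySem.Set.mem_add g p.1 x).mpr (Or.inl hx)); exact ih g c x hx]

lemma pvPassA_unchanged (nts : PySem.Set String) :
    ∀ (l : List (String × List (List String))) (g : PySem.Set String),
      (l.foldl (pvStepA nts) (g, false)).2 = false → (l.foldl (pvStepA nts) (g, false)).1 = g := by
  intro l
  induction l with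
  | nil => intro g _; rfl
  | cons p t ih =>
    intro g h
    simp only [List.foldl_cons, pvStepA] at h ⊢
    split_ifs at h ⊢ with h1 h2
    · exact ih g h
    · rw [pvPassA_flag nts t _] at h; cases h
    · exact ih g h

lemma pvPassA_sound (prods : List (String × List (List String))) (nts : PySem.Set String) :
    ∀ (l : List (String × List (List String))), (∀ p ∈ l, p ∈ prods) →
      ∀ (g : PySem.Set String) (c : Bool), (∀ x ∈ g, pvGen prods nts x) →
        ∀ x ∈ (l.foldl (pvStepA nts) (g, c)).1, pvGen prods nts x := by
  intro l
  induction l with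
  | nil => intro _ g c hg x hx; exact hg x hx
  | cons p t ih =>
    intro hl g c hg x hx
    have hl' : ∀ q ∈ t, q ∈ prods := fun q hq => hl q (List.mem_cons_of_mem p hq)
    simp only [List.foldl_cons, pvStepA] at hx
    split_ifs at hx with h1 h2
    · exact ih hl' g c hg x hx
    · refine ih hl' _ _ ?_ x hx
      intro y hy
      rcases (PySem.Set.mem_add g p.1 y).mp hy with hy' | rfl
      · exact hg y hy'
      · rcases List.any_eq_true.mp h2 with ⟨rhs, hrhs, hall⟩
        refine pvGen.mk p.1 p.2 rhs ?_ hrhs ?_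
        · simpa using hl p List.mem_cons_self
        · intro s hs hn
          exact hg s (pvAllGen_iff.mp hall s hs hn)
    · exact ih hl' g c hg x hx

lemma pvPassA_closed (nts : PySem.Set String) :
    ∀ (l : List (String × List (List String))) (g : PySem.Set String),
      (l.foldl (pvStepA nts) (g, false)).2 = false →
      ∀ p ∈ l, ∀ rhs ∈ p.2, pvAllGen nts g rhs = true → p.1 ∈ g := by
  intro l
  induction l with
  | nil => intro g _ p hp; cases hp
  | cons p t ih =>
    intro g h q hq rhs hrhs hall
    simp only [List.foldl_cons, pvStepA] at h
    split_ifs at h with h1 h2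
    · rcases List.mem_cons.mp hq with rfl | hqt
      · exact pvContains_iff.mp h1
      · exact ih g h q hqt rhs hrhs hall
    · rw [pvPassA_flag nts t _] at h; cases h
    · rcases List.mem_cons.mp hq with rfl | hqt
      · exact absurd hall (List.any_eq_false.mp (eq_false_of_ne_true h2) rhs hrhs)
      · exact ih g h q hqt rhs hrhs hall

lemma pvPassA_growth (nts : PySem.Set String) :
    ∀ (l : List (String × List (List String))) (g : PySem.Set String),
      (l.foldl (pvStepA nts) (g, false)).2 = true →
      ∃ x, x ∈ (l.foldl (pvStepA nts) (g, false)).1 ∧ x ∉ g ∧ x ∈ l.map Prod.fst := by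
  intro l
  induction l with
  | nil => intro g h; cases h
  | cons p t ih =>
    intro g h
    simp only [List.foldl_cons, pvStepA] at h ⊢
    split_ifs at h ⊢ with h1 h2
    · rcases ih g h with ⟨x, hx1, hx2, hx3⟩
      exact ⟨x, hx1, hx2, by simp [hx3]⟩
    · refine ⟨p.1, ?_, ?_, by simp⟩
      · exact pvPassA_mono nts t _ _ p.1 ((PySem.Set.mem_add g p.1 p.1).mpr (Or.inr rfl))
      · exact fun hm => h1 (pvContains_iff.mpr hm)
    · rcases ih g h with ⟨x, hx1, hx2, hx3⟩
      exact ⟨x, hx1, hx2, by simp [hx3]⟩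

lemma pvGenLoopA_sound (prods : List (String × List (List String))) (nts : PySem.Set String) :
    ∀ (fuel : Nat) (g : PySem.Set String), (∀ x ∈ g, pvGen prods nts x) →
      ∀ x ∈ pvGenLoopA prods nts fuel g, pvGen prods nts x := by
  intro fuel
  induction fuel with
  | zero => intro g hg x hx; exact hg x hx
  | succ fuel ih =>
    intro g hg x hx
    have hs : ∀ y ∈ (pvPassA prods nts g).1, pvGen prods nts y :=
      pvPassA_sound prods nts prods (fun p hp => hp) g false hg
    cases h : (pvPassA prods nts g).2 with
    | false =>
      rw [show pvGenLoopA prods nts (fuel + 1) g = (pvPassA prods nts g).1 from by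
        simp [pvGenLoopA, h]] at hx
      exact hs x hx
    | true =>
      rw [show pvGenLoopA prods nts (fuel + 1) g = pvGenLoopA prods nts fuel (pvPassA prods nts g).1 from by
        simp [pvGenLoopA, h]] at hx
      exact ih _ hs x hx

lemma pvGenLoopA_closed (prods : List (String × List (List String))) (nts : PySem.Set String) :
    ∀ (fuel : Nat) (g : PySem.Set String), pvMeas (prods.map Prod.fst) g < fuel →
      ∀ p ∈ prods, ∀ rhs ∈ p.2,
        pvAllGen nts (pvGenLoopA prods nts fuel g) rhs = true → p.1 ∈ pvGenLoopA prods nts fuel g := by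
  intro fuel
  induction fuel with
  | zero => intro g hm; omega
  | succ fuel ih =>
    intro g hm
    cases h : (pvPassA prods nts g).2 with
    | false =>
      rw [show pvGenLoopA prods nts (fuel + 1) g = (pvPassA prods nts g).1 from by
        simp [pvGenLoopA, h]]
      have hu : (pvPassA prods nts g).1 = g := pvPassA_unchanged nts prods g h
      rw [hu]
      exact pvPassA_closed nts prods g h
    | true =>
      rw [show pvGenLoopA prods nts (fuel + 1) g = pvGenLoopA prods nts fuel (pvPassA prods nts g).1 from by
        simp [pvGenLoopA, h]]
      refine ih _ ?_
      have h' : (prods.foldl (pvStepA nts) (g, false)).2 = true := h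
      rcases pvPassA_growth nts prods g h' with ⟨x, hx1, hx2, hx3⟩
      have hlt : pvMeas (prods.map Prod.fst) (pvPassA prods nts g).1 < pvMeas (prods.map Prod.fst) g :=
        pvMeas_lt (fun y hy => pvPassA_mono nts prods g false y hy) hx3 hx2 hx1
      omega

lemma pvGen_complete {prods : List (String × List (List String))} {nts : PySem.Set String}
    {g : List String}
    (hcl : ∀ p ∈ prods, ∀ rhs ∈ p.2, pvAllGen nts g rhs = true → p.1 ∈ g) :
    ∀ x, pvGen prods nts x → x ∈ g := by
  intro x hx
  induction hx with
  | mk lhs rhs_set rhs hmem hrhs hsub ih =>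
    exact hcl (lhs, rhs_set) hmem rhs hrhs (pvAllGen_iff.mpr ih)

-- ===== B's index-building loop and worklist =====

lemma pvLContains_iff {l : List String} {x : String} : l.contains x = true ↔ x ∈ l := by
  simp

lemma pvAllGen_false {nts g : PySem.Set String} {rhs : List String}
    (h : pvAllGen nts g rhs = false) :
    ∃ s ∈ rhs, PySem.Set.contains nts s = true ∧ s ∉ g := by
  rcases List.all_eq_false.mp h with ⟨s, hs, hb⟩
  rcases Bool.or_eq_false_iff.mp (eq_false_of_ne_true hb) with ⟨h1, h2⟩
  exact ⟨s, hs, by simpa using h1, fun hm => by rw [pvContains_iff.mpr hm] at h2; cases h2⟩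

lemma pvInitB_monoG (nts : PySem.Set String) :
    ∀ (l : List (String × List String)) (d : PySem.Dict String (List (String × List String)))
      (g : PySem.Set String) (q : List String) (x : String),
      x ∈ g → x ∈ (l.foldl (pvStepInitB nts) (d, g, q)).2.1 := by
  intro l
  induction l with
  | nil => intro d g q x hx; exact hx
  | cons p t ih =>
    intro d g q x hx
    simp only [List.foldl_cons, pvStepInitB]
    split_ifs
    · exact ih _ _ _ x ((PySem.Set.mem_add g p.1 x).mpr (Or.inl hx))
    · exact ih _ g q x hx

lemma pvInitB_gsubq (nts : PySem.Set String) :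
    ∀ (l : List (String × List String)) (d : PySem.Dict String (List (String × List String)))
      (g : PySem.Set String) (q : List String), (∀ x ∈ g, x ∈ q) →
      ∀ x ∈ (l.foldl (pvStepInitB nts) (d, g, q)).2.1, x ∈ (l.foldl (pvStepInitB nts) (d, g, q)).2.2 := by
  intro l
  induction l with
  | nil => intro d g q hgq x hx; exact hgq x hx
  | cons p t ih =>
    intro d g q hgq x hx
    simp only [List.foldl_cons, pvStepInitB] at hx ⊢
    split_ifs at hx ⊢
    · refine ih _ _ _ ?_ x hx
      intro y hy
      rcases (PySem.Set.mem_add g p.1 y).mp hy with hy' | rfl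
      · exact List.mem_append_left _ (hgq y hy')
      · exact List.mem_append_right _ (by simp)
    · exact ih _ g q hgq x hx

lemma pvInitB_sound (prods : List (String × List (List String))) (nts : PySem.Set String) :
    ∀ (l : List (String × List String)), (∀ p ∈ l, ∃ rs, (p.1, rs) ∈ prods ∧ p.2 ∈ rs) →
      ∀ (d : PySem.Dict String (List (String × List String))) (g : PySem.Set String) (q : List String),
        (∀ x ∈ g, pvGen prods nts x) →
        ∀ x ∈ (l.foldl (pvStepInitB nts) (d, g, q)).2.1, pvGen prods nts x := by
  intro l
  induction l with
  | nil => intro _ d g q hg x hx; exact hg x hx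
  | cons p t ih =>
    intro hl d g q hg x hx
    have hl' : ∀ p' ∈ t, ∃ rs, (p'.1, rs) ∈ prods ∧ p'.2 ∈ rs :=
      fun p' hp' => hl p' (List.mem_cons_of_mem p hp')
    simp only [List.foldl_cons, pvStepInitB] at hx
    split_ifs at hx with hguard
    · refine ih hl' _ _ _ ?_ x hx
      intro y hy
      rcases (PySem.Set.mem_add g p.1 y).mp hy with hy' | rfl
      · exact hg y hy'
      · rcases hl p List.mem_cons_self with ⟨rs, hmem, hrs⟩
        refine pvGen.mk p.1 rs p.2 hmem hrs ?_
        intro s hs hn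
        have h1 : (p.2.filter (fun s => PySem.Set.contains nts s)).isEmpty = true :=
          (Bool.and_eq_true _ _ |>.mp hguard).1
        have : s ∈ p.2.filter (fun s => PySem.Set.contains nts s) := List.mem_filter.mpr ⟨hs, hn⟩
        rw [List.isEmpty_iff.mp h1] at this
        cases this
    · exact ih hl' _ g q hg x hx

lemma pvInitB_noNT (nts : PySem.Set String) :
    ∀ (l : List (String × List String)) (d : PySem.Dict String (List (String × List String)))
      (g : PySem.Set String) (q : List String),
      ∀ p ∈ l, (p.2.filter (fun s => PySem.Set.contains nts s)).isEmpty = true →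
        p.1 ∈ (l.foldl (pvStepInitB nts) (d, g, q)).2.1 := by
  intro l
  induction l with
  | nil => intro d g q p hp; cases hp
  | cons p t ih =>
    intro d g q p' hp' hempty
    rcases List.mem_cons.mp hp' with rfl | hpt
    · simp only [List.foldl_cons, pvStepInitB]
      split_ifs with hguard
      · exact pvInitB_monoG nts t _ _ _ p'.1 ((PySem.Set.mem_add g p'.1 p'.1).mpr (Or.inr rfl))
      · have hcont : PySem.Set.contains g p'.1 = true := by
          rcases Bool.and_eq_false_iff.mp (eq_false_of_ne_true hguard) with h | h
          · rw [hempty] at h; cases h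
          · simpa using h
        exact pvInitB_monoG nts t _ g q p'.1 (pvContains_iff.mp hcont)
    · simp only [List.foldl_cons, pvStepInitB]
      split_ifs
      · exact ih _ _ _ p' hpt hempty
      · exact ih _ g q p' hpt hempty

lemma pvWB_monoG (nts : PySem.Set String) :
    ∀ (l : List (String × List String)) (g : PySem.Set String) (q : List String) (x : String),
      x ∈ g → x ∈ (l.foldl (pvStepWB nts) (g, q)).1 := by
  intro l
  induction l with
  | nil => intro g q x hx; exact hx
  | cons p t ih =>
    intro g q x hx
    simp only [List.foldl_cons, pvStepWB]
    split_ifs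
    · exact ih _ _ x ((PySem.Set.mem_add g p.1 x).mpr (Or.inl hx))
    · exact ih g q x hx

lemma pvWB_monoQ (nts : PySem.Set String) :
    ∀ (l : List (String × List String)) (g : PySem.Set String) (q : List String) (x : String),
      x ∈ q → x ∈ (l.foldl (pvStepWB nts) (g, q)).2 := by
  intro l
  induction l with
  | nil => intro g q x hx; exact hx
  | cons p t ih =>
    intro g q x hx
    simp only [List.foldl_cons, pvStepWB]
    split_ifs
    · exact ih _ _ x (List.mem_append_left _ hx)
    · exact ih g q x hx

lemma pvWB_split (nts : PySem.Set String) :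
    ∀ (l : List (String × List String)) (g : PySem.Set String) (q : List String) (x : String),
      x ∈ (l.foldl (pvStepWB nts) (g, q)).1 → x ∈ g ∨ x ∈ (l.foldl (pvStepWB nts) (g, q)).2 := by
  intro l
  induction l with
  | nil => intro g q x hx; exact Or.inl hx
  | cons p t ih =>
    intro g q x hx
    simp only [List.foldl_cons, pvStepWB] at hx ⊢
    split_ifs at hx ⊢
    · rcases ih _ _ x hx with h | h
      · rcases (PySem.Set.mem_add g p.1 x).mp h with h' | he
        · exact Or.inl h'
        · exact Or.inr (pvWB_monoQ nts t _ _ x (List.mem_append_right _ (by simp [he])))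
      · exact Or.inr h
    · exact ih g q x hx

lemma pvWB_sound (prods : List (String × List (List String))) (nts : PySem.Set String) :
    ∀ (l : List (String × List String)), (∀ p ∈ l, ∃ rs, (p.1, rs) ∈ prods ∧ p.2 ∈ rs) →
      ∀ (g : PySem.Set String) (q : List String), (∀ x ∈ g, pvGen prods nts x) →
      ∀ x ∈ (l.foldl (pvStepWB nts) (g, q)).1, pvGen prods nts x := by
  intro l
  induction l with
  | nil => intro _ g q hg x hx; exact hg x hx
  | cons p t ih =>
    intro hl g q hg x hx
    have hl' : ∀ p' ∈ t, ∃ rs, (p'.1, rs) ∈ prods ∧ p'.2 ∈ rs :=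
      fun p' hp' => hl p' (List.mem_cons_of_mem p hp')
    simp only [List.foldl_cons, pvStepWB] at hx
    split_ifs at hx with hguard
    · refine ih hl' _ _ ?_ x hx
      intro y hy
      rcases (PySem.Set.mem_add g p.1 y).mp hy with hy' | rfl
      · exact hg y hy'
      · rcases hl p List.mem_cons_self with ⟨rs, hmem, hrs⟩
        refine pvGen.mk p.1 rs p.2 hmem hrs ?_
        intro s hs hn
        exact hg s (pvAllGen_iff.mp (Bool.and_eq_true _ _ |>.mp hguard).2 s hs hn)
    · exact ih hl' g q hg x hx

lemma pvWB_local (nts : PySem.Set String) :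
    ∀ (l : List (String × List String)) (g : PySem.Set String) (q : List String),
      ∀ p ∈ l,
        (∀ s ∈ p.2, PySem.Set.contains nts s = true →
          s ∈ (l.foldl (pvStepWB nts) (g, q)).1 ∧ s ∉ (l.foldl (pvStepWB nts) (g, q)).2) →
        p.1 ∈ (l.foldl (pvStepWB nts) (g, q)).1 := by
  intro l
  induction l with
  | nil => intro g q p hp; cases hp
  | cons a t ih =>
    intro g q p hp hprem
    rcases List.mem_cons.mp hp with rfl | hpt
    · simp only [List.foldl_cons, pvStepWB] at hprem ⊢
      split_ifs at hprem ⊢ with hguard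
      · exact pvWB_monoG nts t _ _ p.1 ((PySem.Set.mem_add g p.1 p.1).mpr (Or.inr rfl))
      · rcases Bool.and_eq_false_iff.mp (eq_false_of_ne_true hguard) with h | h
        · have : p.1 ∈ g := pvContains_iff.mp (by simpa using h)
          exact pvWB_monoG nts t g q p.1 this
        · rcases pvAllGen_false h with ⟨s, hs, hn, hsg⟩
          rcases hprem s hs hn with ⟨h1, h2⟩
          rcases pvWB_split nts t g q s h1 with h' | h'
          · exact absurd h' hsg
          · exact absurd h' h2
    · simp only [List.foldl_cons, pvStepWB] at hprem ⊢
      split_ifs at hprem ⊢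
      · exact ih _ _ p hpt hprem
      · exact ih g q p hpt hprem

lemma pvWB_meas (nts : PySem.Set String) (K : List String) :
    ∀ (l : List (String × List String)), (∀ p ∈ l, p.1 ∈ K) →
      ∀ (g : PySem.Set String) (q : List String),
        pvMeas K (l.foldl (pvStepWB nts) (g, q)).1 + ((l.foldl (pvStepWB nts) (g, q)).2).length
          ≤ pvMeas K g + q.length := by
  intro l
  induction l with
  | nil => intro _ g q; exact Nat.le_refl _
  | cons p t ih =>
    intro hl g q
    have hl' : ∀ p' ∈ t, p'.1 ∈ K := fun p' hp' => hl p' (List.mem_cons_of_mem p hp')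
    simp only [List.foldl_cons, pvStepWB]
    split_ifs with hguard
    · have hK : p.1 ∈ K := hl p List.mem_cons_self
      have hng : p.1 ∉ g := by
        intro hm
        have := (Bool.and_eq_true _ _ |>.mp hguard).1
        rw [pvContains_iff.mpr hm] at this
        cases this
      have hdec := pvMeas_add (g := g) hK hng
      have := ih hl' (PySem.Set.add g p.1) (q ++ [p.1])
      simp only [List.length_append, List.length_cons, List.length_nil] at this ⊢
      omega
    · exact ih hl' g q

lemma pvWorklistB_sound (prods : List (String × List (List String))) (nts : PySem.Set String)
    (occ : PySem.Dict String (List (String × List String))) (flat : List (String × List String))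
    (hocc : ∀ s, occ.getD s [] =
      if PySem.Set.contains nts s = true then flat.filter (fun p => p.2.contains s) else [])
    (hflat : ∀ p ∈ flat, ∃ rs, (p.1, rs) ∈ prods ∧ p.2 ∈ rs) :
    ∀ (fuel : Nat) (q : List String) (g : PySem.Set String),
      (∀ x ∈ g, pvGen prods nts x) → ∀ x ∈ pvWorklistB nts occ fuel q g, pvGen prods nts x := by
  intro fuel
  induction fuel with
  | zero => intro q g hg x hx; exact hg x hx
  | succ fuel ih =>
    intro q g hg x hx
    cases q with
    | nil => exact hg x hx
    | cons sym rest =>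
      rw [show pvWorklistB nts occ (fuel + 1) (sym :: rest) g
          = pvWorklistB nts occ fuel ((occ.getD sym []).foldl (pvStepWB nts) (g, rest)).2
              ((occ.getD sym []).foldl (pvStepWB nts) (g, rest)).1 from by
        simp [pvWorklistB]] at hx
      have hsub : ∀ p ∈ occ.getD sym [], ∃ rs, (p.1, rs) ∈ prods ∧ p.2 ∈ rs := by
        intro p hp
        rw [hocc sym] at hp
        split_ifs at hp
        · exact hflat p (List.mem_of_mem_filter hp)
        · cases hp
      exact ih _ _ (pvWB_sound prods nts (occ.getD sym []) hsub g rest hg) x hx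

lemma pvWorklistB_closed (prods : List (String × List (List String))) (nts : PySem.Set String)
    (occ : PySem.Dict String (List (String × List String))) (flat : List (String × List String))
    (hocc : ∀ s, occ.getD s [] =
      if PySem.Set.contains nts s = true then flat.filter (fun p => p.2.contains s) else [])
    (hK : ∀ p ∈ flat, p.1 ∈ prods.map Prod.fst) :
    ∀ (fuel : Nat) (q : List String) (g : PySem.Set String),
      pvMeas (prods.map Prod.fst) g + q.length < fuel →
      (∀ p ∈ flat, (∀ s ∈ p.2, PySem.Set.contains nts s = true → s ∈ g ∧ s ∉ q) → p.1 ∈ g) →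
      ∀ p ∈ flat, pvAllGen nts (pvWorklistB nts occ fuel q g) p.2 = true →
        p.1 ∈ pvWorklistB nts occ fuel q g := by
  intro fuel
  induction fuel with
  | zero => intro q g hm; omega
  | succ fuel ih =>
    intro q g hm hInv
    cases q with
    | nil =>
      intro p hp hall
      exact hInv p hp (fun s hs hn => ⟨pvAllGen_iff.mp hall s hs hn, by simp⟩)
    | cons sym rest =>
      rw [show pvWorklistB nts occ (fuel + 1) (sym :: rest) g
          = pvWorklistB nts occ fuel ((occ.getD sym []).foldl (pvStepWB nts) (g, rest)).2
              ((occ.getD sym []).foldl (pvStepWB nts) (g, rest)).1 from by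
        simp [pvWorklistB]]
      refine ih _ _ ?_ ?_
      · have h1 : pvMeas (prods.map Prod.fst) ((occ.getD sym []).foldl (pvStepWB nts) (g, rest)).1
            + (((occ.getD sym []).foldl (pvStepWB nts) (g, rest)).2).length
            ≤ pvMeas (prods.map Prod.fst) g + rest.length := by
          refine pvWB_meas nts (prods.map Prod.fst) (occ.getD sym []) ?_ g rest
          intro p hp
          rw [hocc sym] at hp
          split_ifs at hp
          · exact hK p (List.mem_of_mem_filter hp)
          · cases hp
        simp only [List.length_cons] at hm
        omega
      · intro p hp hprem
        by_cases hcase : PySem.Set.contains nts sym = true ∧ p.2.contains sym = true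
        · have hpin : p ∈ occ.getD sym [] := by
            rw [hocc sym, if_pos hcase.1]
            exact List.mem_filter.mpr ⟨hp, hcase.2⟩
          exact pvWB_local nts (occ.getD sym []) g rest p hpin hprem
        · have hold : ∀ s ∈ p.2, PySem.Set.contains nts s = true → s ∈ g ∧ s ∉ sym :: rest := by
            intro s hs hn
            rcases hprem s hs hn with ⟨h1, h2⟩
            have hsg : s ∈ g := by
              rcases pvWB_split nts (occ.getD sym []) g rest s h1 with h | h
              · exact h
              · exact absurd h h2
            refine ⟨hsg, ?_⟩
            intro hmem
            rcases List.mem_cons.mp hmem with rfl | hmr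
            · exact hcase ⟨hn, pvLContains_iff.mpr hs⟩
            · exact h2 (pvWB_monoQ nts (occ.getD sym []) g rest s hmr)
          exact pvWB_monoG nts (occ.getD sym []) g rest p.1 (hInv p hp hold)

-- ===== the occurrence index is exact =====

lemma pvNodupFilterEq {l : List String} (h : l.Nodup) (s : String) :
    l.filter (fun a => a == s) = if s ∈ l then [s] else [] := by
  induction l with
  | nil => simp
  | cons a t ih =>
    rcases List.nodup_cons.mp h with ⟨hna, hnt⟩
    by_cases has : a = s
    · subst has
      have hft : t.filter (fun x => x == a) = [] := by
        refine List.filter_eq_nil_iff.mpr ?_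
        intro x hx
        simp only [beq_iff_eq]
        intro he
        exact hna (he ▸ hx)
      simp [List.filter_cons, hft]
    · have hne : (a == s) = false := by simp [has]
      have hst : (s ∈ a :: t) ↔ s ∈ t := by
        constructor
        · intro h'
          rcases List.mem_cons.mp h' with h'' | h''
          · exact absurd h''.symm has
          · exact h''
        · exact List.mem_cons_of_mem a
      rw [List.filter_cons, hne]
      simp only [Bool.false_eq_true, if_false]
      rw [ih hnt]
      by_cases hst2 : s ∈ t
      · rw [if_pos hst2, if_pos (hst.mpr hst2)]
      · rw [if_neg hst2, if_neg (fun hh => hst2 (hst.mp hh))]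

lemma pvOccStep (nts : PySem.Set String) (p : String × List String)
    (d : PySem.Dict String (List (String × List String))) (s : String) :
    ((PySem.List.dedup (p.2.filter (fun s' => PySem.Set.contains nts s'))).foldl
        (fun d s' => d.modify s' [] (fun l => l ++ [p])) d).getD s []
      = d.getD s [] ++ (if PySem.Set.contains nts s && p.2.contains s then [p] else []) := by
  have hmap : (PySem.List.dedup (p.2.filter (fun s' => PySem.Set.contains nts s'))).foldl
      (fun d s' => d.modify s' [] (fun l => l ++ [p])) d
      = ((PySem.List.dedup (p.2.filter (fun s' => PySem.Set.contains nts s'))).map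
          (fun s' => (s', p))).foldl (fun d pr => d.modify pr.1 [] (fun l => l ++ [pr.2])) d := by
    rw [List.foldl_map]
  rw [hmap, PySem.Dict.getD_foldl_modify_append]
  congr 1
  rw [List.filter_map]
  have hcomp : ((fun pr : String × (String × List String) => pr.1 == s) ∘ (fun s' => (s', p)))
      = (fun a => a == s) := rfl
  rw [hcomp, pvNodupFilterEq (PySem.List.nodup_dedup _) s]
  have hiff : s ∈ PySem.List.dedup (p.2.filter (fun s' => PySem.Set.contains nts s'))
      ↔ (s ∈ p.2 ∧ PySem.Set.contains nts s = true) := by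
    rw [PySem.List.mem_dedup, List.mem_filter]
  by_cases hin : s ∈ PySem.List.dedup (p.2.filter (fun s' => PySem.Set.contains nts s'))
  · rcases hiff.mp hin with ⟨h1, h2⟩
    have h3 : p.2.contains s = true := pvLContains_iff.mpr h1
    have hb : (PySem.Set.contains nts s && p.2.contains s) = true := by rw [h2, h3]; rfl
    rw [if_pos hin, hb]
    simp
  · have hnb : ¬(PySem.Set.contains nts s && p.2.contains s) = true := by
      intro hb
      rcases Bool.and_eq_true _ _ |>.mp hb with ⟨hb1, hb2⟩
      exact hin (hiff.mpr ⟨pvLContains_iff.mp hb2, hb1⟩)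
    have hb : (PySem.Set.contains nts s && p.2.contains s) = false := eq_false_of_ne_true hnb
    rw [if_neg hin, hb]
    simp

lemma pvInitB_occ (nts : PySem.Set String) (flat : List (String × List String)) (s : String) :
    (pvInitB nts flat).1.getD s []
      = if PySem.Set.contains nts s = true then flat.filter (fun p => p.2.contains s) else [] := by
  have H : ∀ (l : List (String × List String)) (d : PySem.Dict String (List (String × List String)))
      (g : PySem.Set String) (q : List String),
      ((l.foldl (pvStepInitB nts) (d, g, q)).1).getD s []
        = d.getD s [] ++ (if PySem.Set.contains nts s = true
            then l.filter (fun p => p.2.contains s) else []) := by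
    intro l
    induction l with
    | nil => intro d g q; simp
    | cons p t ih =>
      intro d g q
      simp only [List.foldl_cons]
      have hstep : pvStepInitB nts (d, g, q) p
          = ((PySem.List.dedup (p.2.filter (fun s' => PySem.Set.contains nts s'))).foldl
                (fun d s' => d.modify s' [] (fun l => l ++ [p])) d,
             (pvStepInitB nts (d, g, q) p).2.1, (pvStepInitB nts (d, g, q) p).2.2) := by
        simp only [pvStepInitB]
        split_ifs <;> rfl
      rw [hstep, ih, pvOccStep]
      by_cases hc : PySem.Set.contains nts s = true
      · simp only [hc, if_true, List.filter_cons, Bool.true_and]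
        cases hps : p.2.contains s <;> simp [List.append_assoc]
      · have hc' : PySem.Set.contains nts s = false := eq_false_of_ne_true hc
        have hsn : s ∉ nts := fun hm => by rw [pvContains_iff.mpr hm] at hc'; cases hc'
        simp [hc', hsn, List.append_assoc]
  have := H flat PySem.Dict.empty PySem.Set.empty []
  simpa [pvInitB] using this

lemma pvFlat_mem {prods : List (String × List (List String))} {lhs : String} {rhs : List String} :
    (lhs, rhs) ∈ pvFlat prods ↔ ∃ rs, (lhs, rs) ∈ prods ∧ rhs ∈ rs := by
  constructor
  · intro h
    rcases List.mem_flatMap.mp h with ⟨p, hp, hmem⟩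
    rcases List.mem_map.mp hmem with ⟨r, hr, heq⟩
    rcases Prod.mk.injEq _ _ _ _ ▸ heq with ⟨h1, h2⟩
    exact ⟨p.2, by rw [← h1]; simpa using hp, h2 ▸ hr⟩
  · rintro ⟨rs, hmem, hr⟩
    exact List.mem_flatMap.mpr ⟨(lhs, rs), hmem, List.mem_map.mpr ⟨rhs, hr, rfl⟩⟩

-- ===== the three pipeline stages agree =====

lemma pvFilteredAB_aux (nts : PySem.Set String) {g₁ g₂ : PySem.Set String}
    (h : ∀ x, x ∈ g₁ ↔ x ∈ g₂) :
    ∀ (l : List (String × List (List String))) (d : PySem.Dict String (List (List String))),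
      l.foldl (fun d p =>
        if PySem.Set.contains g₁ p.1 then
          let valid := p.2.foldl
            (fun (v : PySem.Set (List String)) rhs =>
              if pvAllGen nts g₁ rhs then PySem.Set.add v rhs else v)
            PySem.Set.empty
          if valid = [] then d else d.insert p.1 valid
        else d) d
      = l.foldl (fun d p =>
        let valid := PySem.Set.ofList (p.2.filter (fun rhs => pvAllGen nts g₂ rhs))
        if PySem.Set.contains g₂ p.1 && !valid.isEmpty then d.insert p.1 valid else d) d := by
  intro l
  induction l with
  | nil => intro d; rfl
  | cons p t ih =>
    intro d
    simp only [List.foldl_cons]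
    have hv : p.2.foldl
        (fun (v : PySem.Set (List String)) rhs =>
          if pvAllGen nts g₁ rhs then PySem.Set.add v rhs else v)
        PySem.Set.empty
        = PySem.Set.ofList (p.2.filter (fun rhs => pvAllGen nts g₂ rhs)) := by
      rw [pvAddIf_eq, PySem.Set.ofList_eq_foldl]
      congr 1
      exact List.filter_congr (fun rhs _ => pvAllGen_congr nts h rhs)
    rw [hv, pvContains_congr h p.1]
    by_cases hc : PySem.Set.contains g₂ p.1 = true
    · by_cases he : PySem.Set.ofList (p.2.filter (fun rhs => pvAllGen nts g₂ rhs)) = ([] : List (List String))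
      · simp only [hc, if_true, he, List.isEmpty_nil, Bool.not_true, Bool.and_false,
          Bool.false_eq_true, if_false]
        exact ih d
      · have hne : (PySem.Set.ofList (p.2.filter (fun rhs => pvAllGen nts g₂ rhs))).isEmpty = false := by
          rw [List.isEmpty_eq_false_iff_exists_mem]
          rcases List.exists_mem_of_ne_nil _ he with ⟨x, hx⟩
          exact ⟨x, hx⟩
        simp only [hc, if_true, he, if_false, hne, Bool.not_false, Bool.and_true, if_true]
        exact ih _
    · have hc' : PySem.Set.contains g₂ p.1 = false := eq_false_of_ne_true hc
      simp only [hc', Bool.false_eq_true, if_false, Bool.false_and]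
      exact ih d

lemma pvFilteredAB (prods : List (String × List (List String))) (nts : PySem.Set String)
    {g₁ g₂ : PySem.Set String} (h : ∀ x, x ∈ g₁ ↔ x ∈ g₂) :
    pvFilteredA prods nts g₁ = pvFilteredB prods nts g₂ := by
  unfold pvFilteredA pvFilteredB
  exact pvFilteredAB_aux nts h prods PySem.Dict.empty

lemma pvFinalAB_aux (f : PySem.Dict String (List (List String))) (r : PySem.Set String) :
    ∀ (l : List (String × List (List String))) (d : PySem.Dict String (List (List String))),
      l.foldl (fun d p =>
        if PySem.Set.contains r p.1 then
          let kept := p.2.foldl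
            (fun (v : PySem.Set (List String)) rhs =>
              if rhs.all (fun s => !(f.contains s) || PySem.Set.contains r s) then
                PySem.Set.add v rhs
              else v)
            PySem.Set.empty
          if kept = [] then d else d.insert p.1 kept
        else d) d
      = l.foldl (fun d p =>
        let kept := PySem.Set.ofList (p.2.filter
          (fun rhs => rhs.all (fun s => !(f.contains s) || PySem.Set.contains r s)))
        if PySem.Set.contains r p.1 && !kept.isEmpty then d.insert p.1 kept else d) d := by
  intro l
  induction l with
  | nil => intro d; rfl
  | cons p t ih =>
    intro d
    simp only [List.foldl_cons]
    have hv : p.2.foldl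
        (fun (v : PySem.Set (List String)) rhs =>
          if rhs.all (fun s => !(f.contains s) || PySem.Set.contains r s) then
            PySem.Set.add v rhs
          else v)
        PySem.Set.empty
        = PySem.Set.ofList (p.2.filter
            (fun rhs => rhs.all (fun s => !(f.contains s) || PySem.Set.contains r s))) := by
      rw [pvAddIf_eq, PySem.Set.ofList_eq_foldl]
      rfl
    rw [hv]
    by_cases hc : PySem.Set.contains r p.1 = true
    · by_cases he : PySem.Set.ofList (p.2.filter
          (fun rhs => rhs.all (fun s => !(f.contains s) || PySem.Set.contains r s))) = ([] : List (List String))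
      · simp only [hc, if_true, he, List.isEmpty_nil, Bool.not_true, Bool.and_false,
          Bool.false_eq_true, if_false]
        exact ih d
      · have hne : (PySem.Set.ofList (p.2.filter
            (fun rhs => rhs.all (fun s => !(f.contains s) || PySem.Set.contains r s)))).isEmpty = false := by
          rw [List.isEmpty_eq_false_iff_exists_mem]
          rcases List.exists_mem_of_ne_nil _ he with ⟨x, hx⟩
          exact ⟨x, hx⟩
        simp only [hc, if_true, he, if_false, hne, Bool.not_false, Bool.and_true, if_true]
        exact ih _
    · have hc' : PySem.Set.contains r p.1 = false := eq_false_of_ne_true hc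
      simp only [hc', Bool.false_eq_true, if_false, Bool.false_and]
      exact ih d

lemma pvFinalAB (f : PySem.Dict String (List (List String))) (r : PySem.Set String) :
    pvFinalA f r = pvFinalB f r := by
  unfold pvFinalA pvFinalB
  exact pvFinalAB_aux f r f.items PySem.Dict.empty

-- ===== assembly =====

lemma pvMainEq (prods : List (String × List (List String))) (start : String) :
    eliminate_useless_symbols_py prods start = eliminate_useless_symbols_py_alt prods start := by
  simp only [eliminate_useless_symbols_py, eliminate_useless_symbols_py_alt]
  set nts := PySem.Set.ofList (prods.map Prod.fst) with hnts
  set flat := pvFlat prods with hflatdef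
  set init := pvInitB nts flat with hinitdef
  set genA := pvGenLoopA prods nts (prods.length + 1) PySem.Set.empty with hgA
  set genB := pvWorklistB nts init.1 (prods.length + init.2.2.length + 1) init.2.2 init.2.1 with hgB
  have hsoundA : ∀ x ∈ genA, pvGen prods nts x := by
    refine pvGenLoopA_sound prods nts _ _ ?_
    intro x hx
    simp [PySem.Set.empty] at hx
  have hclA : ∀ p ∈ prods, ∀ rhs ∈ p.2, pvAllGen nts genA rhs = true → p.1 ∈ genA := by
    refine pvGenLoopA_closed prods nts _ _ ?_
    have := pvMeas_le (prods.map Prod.fst) PySem.Set.empty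
    simp only [List.length_map] at this
    omega
  have hflatmem : ∀ p ∈ flat, ∃ rs, (p.1, rs) ∈ prods ∧ p.2 ∈ rs := by
    intro p hp
    obtain ⟨l, r⟩ := p
    exact pvFlat_mem.mp hp
  have hKflat : ∀ p ∈ flat, p.1 ∈ prods.map Prod.fst := by
    intro p hp
    rcases hflatmem p hp with ⟨rs, hm, _⟩
    exact List.mem_map.mpr ⟨(p.1, rs), hm, rfl⟩
  have hoccB : ∀ s, init.1.getD s []
      = if PySem.Set.contains nts s = true then flat.filter (fun p => p.2.contains s) else [] :=
    fun s => pvInitB_occ nts flat s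
  have hsound0 : ∀ x ∈ init.2.1, pvGen prods nts x := by
    refine pvInitB_sound prods nts flat hflatmem _ _ _ ?_
    intro x hx
    simp [PySem.Set.empty] at hx
  have hgsubq : ∀ x ∈ init.2.1, x ∈ init.2.2 := by
    refine pvInitB_gsubq nts flat _ _ _ ?_
    intro x hx
    simp [PySem.Set.empty] at hx
  have hInv0 : ∀ p ∈ flat,
      (∀ s ∈ p.2, PySem.Set.contains nts s = true → s ∈ init.2.1 ∧ s ∉ init.2.2) →
      p.1 ∈ init.2.1 := by
    intro p hp hprem
    refine pvInitB_noNT nts flat _ _ _ p hp ?_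
    rw [List.isEmpty_iff]
    by_contra hne
    rcases List.exists_mem_of_ne_nil _ hne with ⟨s, hs⟩
    rcases List.mem_filter.mp hs with ⟨hs1, hs2⟩
    rcases hprem s hs1 hs2 with ⟨h1, h2⟩
    exact h2 (hgsubq s h1)
  have hsoundB : ∀ x ∈ genB, pvGen prods nts x :=
    pvWorklistB_sound prods nts init.1 flat hoccB hflatmem _ _ _ hsound0
  have hclBflat : ∀ p ∈ flat, pvAllGen nts genB p.2 = true → p.1 ∈ genB := by
    refine pvWorklistB_closed prods nts init.1 flat hoccB hKflat _ _ _ ?_ hInv0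
    have := pvMeas_le (prods.map Prod.fst) init.2.1
    simp only [List.length_map] at this
    omega
  have hclB : ∀ p ∈ prods, ∀ rhs ∈ p.2, pvAllGen nts genB rhs = true → p.1 ∈ genB := by
    intro p hp rhs hrhs hall
    exact hclBflat (p.1, rhs) (pvFlat_mem.mpr ⟨p.2, by simpa using hp, hrhs⟩) hall
  have memEq : ∀ x, x ∈ genA ↔ x ∈ genB := fun x =>
    ⟨fun hx => pvGen_complete hclB x (hsoundA x hx),
     fun hx => pvGen_complete hclA x (hsoundB x hx)⟩
  rw [pvFilteredAB prods nts memEq, pvFinalAB]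

-- ===== VERDICT (by name: the statement is the Claim_ definition above) =====
theorem eliminate_useless_symbols_py_spec : Claim_equal_eliminate_useless_symbols_py := by
  unfold Claim_equal_eliminate_useless_symbols_py
  intro productions start_symbol _
  unfold Spec_eliminate_useless_symbols_py
  exact pvMainEq productions start_symbol
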